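-- pv_equiv track=rewrite | github.com/MeenakshiKathiresan/leetcode-solutions | 2363-merge-similar-items/2363-merge-similar-items.py | mergeSimilarItems
-- ===== SOURCE A (Python) =====
-- def mergeSimilarItems(items1, items2):
--     """
--     :type items1: List[List[int]]
--     :type items2: List[List[int]]
--     :rtype: List[List[int]]
--     """
--     value_weight = {}
--
--     for item in items1:
--         if item[0] not in value_weight:
--             value_weight[item[0]] = 0
--         value_weight[item[0]] += item[1]
--
--     for item in items2:
--         if item[0] not in value_weight:
--             value_weight[item[0]] = 0
--         value_weight[item[0]] += item[1]
--
--
--     return sorted([[value, weight] for value, weight in value_weight.items()])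
-- ===== SOURCE B (Python) =====
-- def mergeSimilarItems(items1, items2):
--     both = items1 + items2
--     vals = sorted(set(item[0] for item in both))
--     return [[v, sum(item[1] for item in both if item[0] == v)] for v in vals]
-- ===== Notes on version B (the rewrite author's own statement) =====
-- stated objective: simpler
-- what changed: Replaces A's dict-accumulation followed by a final sort with a direct construction: sort the distinct values once and compute each value's total weight by a comprehension sum over the concatenated input.
import Mathlib
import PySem

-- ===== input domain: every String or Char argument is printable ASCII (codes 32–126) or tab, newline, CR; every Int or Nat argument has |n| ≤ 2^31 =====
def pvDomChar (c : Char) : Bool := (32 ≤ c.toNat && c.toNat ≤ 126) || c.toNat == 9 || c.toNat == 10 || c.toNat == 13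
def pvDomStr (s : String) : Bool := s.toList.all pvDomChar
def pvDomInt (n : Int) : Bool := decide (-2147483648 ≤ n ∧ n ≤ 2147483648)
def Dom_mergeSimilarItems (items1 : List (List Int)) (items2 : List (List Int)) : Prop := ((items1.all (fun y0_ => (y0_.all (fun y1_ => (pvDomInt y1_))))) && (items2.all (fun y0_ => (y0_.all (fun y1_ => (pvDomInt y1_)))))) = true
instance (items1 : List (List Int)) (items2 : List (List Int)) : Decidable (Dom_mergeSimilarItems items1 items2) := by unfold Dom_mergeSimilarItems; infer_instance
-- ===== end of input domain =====

-- B replaces A's dict-accumulate-then-sort by "sorted distinct values, then a per-value weight sum" (objective: simpler; not faster).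

-- item[0] / item[1]; Pre_ guarantees the index is in range, so the .getD 0 default is never used
def pvKey (item : List Int) : Int := (PySem.List.pyGet? item 0).getD 0
def pvWt (item : List Int) : Int := (PySem.List.pyGet? item 1).getD 0

-- ===== PORT A =====
-- one iteration of A's loop body: "if item[0] not in d: d[item[0]] = 0; d[item[0]] += item[1]"
def pvStepA (d : PySem.Dict Int Int) (item : List Int) : PySem.Dict Int Int :=
  let d1 := if d.contains (pvKey item) = false then d.insert (pvKey item) 0 else d
  d1.insert (pvKey item) (d1.getD (pvKey item) 0 + pvWt item)

def mergeSimilarItems (items1 : List (List Int)) (items2 : List (List Int)) : List (List Int) :=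
  let d := items1.foldl pvStepA PySem.Dict.empty
  let d := items2.foldl pvStepA d
  PySem.List.sorted (d.items.map (fun p => [p.1, p.2])) (fun x => x) false

-- ===== PORT B =====
def mergeSimilarItems_alt (items1 : List (List Int)) (items2 : List (List Int)) : List (List Int) :=
  let both := items1 ++ items2
  let vals := PySem.List.sorted (PySem.Set.ofList (both.map (fun item => pvKey item))) (fun v => v) false
  vals.map (fun v => [v, ((both.filter (fun item => pvKey item == v)).map (fun item => pvWt item)).sum])

-- ===== PRECONDITION & SPEC =====
-- Pre_ excludes exactly the inputs where A raises IndexError (an inner list with fewer than two entries); B raises there too.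
def Pre_mergeSimilarItems (items1 : List (List Int)) (items2 : List (List Int)) : Prop :=
  (∀ it ∈ items1, 2 ≤ it.length) ∧ (∀ it ∈ items2, 2 ≤ it.length)
instance (items1 : List (List Int)) (items2 : List (List Int)) : Decidable (Pre_mergeSimilarItems items1 items2) := by unfold Pre_mergeSimilarItems; infer_instance
def pvWitness_mergeSimilarItems : List (List Int) × List (List Int) := ([[1, 2], [3, 1]], [[1, 3]])

def Spec_mergeSimilarItems (items1 : List (List Int)) (items2 : List (List Int)) (out : List (List Int)) : Prop := out = mergeSimilarItems_alt items1 items2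
instance (items1 : List (List Int)) (items2 : List (List Int)) (out : List (List Int)) : Decidable (Spec_mergeSimilarItems items1 items2 out) := by unfold Spec_mergeSimilarItems; infer_instance

-- ===== CLAIM (what is proved, stated in full; the proofs are below) =====
def Claim_equal_mergeSimilarItems : Prop := ∀ (items1 : List (List Int)) (items2 : List (List Int)), Dom_mergeSimilarItems items1 items2 → Pre_mergeSimilarItems items1 items2 → Spec_mergeSimilarItems items1 items2 (mergeSimilarItems items1 items2)

-- ===== LEMMAS AND PROOFS =====

-- the total weight B computes for a value v
def pvTotal (l : List (List Int)) (v : Int) : Int :=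
  ((l.filter (fun item => pvKey item == v)).map (fun item => pvWt item)).sum

lemma pvStepA_eq (d : PySem.Dict Int Int) (item : List Int) :
    pvStepA d item = d.insert (pvKey item) (d.getD (pvKey item) 0 + pvWt item) := by
  unfold pvStepA
  cases h : d.contains (pvKey item) with
  | false =>
      show (d.insert (pvKey item) 0).insert (pvKey item)
          ((d.insert (pvKey item) 0).getD (pvKey item) 0 + pvWt item) = _
      rw [PySem.Dict.getD_insert_self, PySem.Dict.insert_insert_self,
        PySem.Dict.getD_of_not_contains d 0 h]
  | true =>
      show ((if (true = false) then d.insert (pvKey item) 0 else d).insert (pvKey item)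
        ((if (true = false) then d.insert (pvKey item) 0 else d).getD (pvKey item) 0 + pvWt item)) = _
      rw [if_neg (by simp)]

lemma pvStepA_fun_eq : pvStepA =
    fun d item => d.insert (pvKey item) (d.getD (pvKey item) 0 + pvWt item) :=
  funext fun d => funext fun item => pvStepA_eq d item

lemma pvGetD_fold (l : List (List Int)) : ∀ (d : PySem.Dict Int Int) (v : Int),
    (l.foldl pvStepA d).getD v 0 = d.getD v 0 + pvTotal l v := by
  induction l with
  | nil => intro d v; simp [pvTotal]
  | cons a t ih =>
      intro d v
      rw [List.foldl_cons, ih, pvStepA_eq, PySem.Dict.getD_insert]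
      by_cases hv : v = pvKey a
      · simp [pvTotal, hv, add_assoc]
      · have : (pvKey a == v) = false := by simpa using (Ne.symm hv)
        simp [pvTotal, this, hv]

lemma pvKeys_fold (l : List (List Int)) (d : PySem.Dict Int Int) :
    (l.foldl pvStepA d).keys = PySem.Set.update d.keys (l.map pvKey) := by
  rw [pvStepA_fun_eq]
  exact PySem.Dict.keys_foldl_insert_key l pvKey _ d

lemma pvNodup_keys_fold (l : List (List Int)) :
    (l.foldl pvStepA PySem.Dict.empty).keys.Nodup := by
  rw [pvStepA_fun_eq]
  exact PySem.Dict.nodup_keys_foldl_insert_key l pvKey _ _ PySem.Dict.nodup_keys_empty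

lemma pvSet_update_nil (xs : List Int) :
    PySem.Set.update ([] : List Int) xs = PySem.Set.ofList xs := by
  rw [PySem.Set.ofList_eq_foldl]; rfl

-- ===== VERDICT (by name: the statement is the Claim_ definition above) =====
theorem mergeSimilarItems_spec : Claim_equal_mergeSimilarItems := by
  intro items1 items2 _ _
  unfold Spec_mergeSimilarItems mergeSimilarItems mergeSimilarItems_alt
  dsimp only
  rw [← List.foldl_append]
  set both := items1 ++ items2 with hboth
  set D := both.foldl pvStepA PySem.Dict.empty with hD
  have hnodup : D.keys.Nodup := pvNodup_keys_fold both
  have hkeys : D.keys = PySem.Set.ofList (both.map pvKey) := by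
    rw [hD, pvKeys_fold, PySem.Dict.keys_empty, pvSet_update_nil]
  have hget : ∀ v, D.getD v 0 = pvTotal both v := by
    intro v; rw [hD, pvGetD_fold, PySem.Dict.getD_empty, zero_add]
  have hitems : D.items = D.keys.map (fun k => (k, pvTotal both k)) := by
    rw [PySem.Dict.items_eq_map_keys D hnodup 0]
    exact List.map_congr_left (fun k _ => by rw [hget k])
  rw [hitems, hkeys, List.map_map]
  rw [Subsingleton.elim (fun (a b : List Int) => a.decidableLT b)
    (@LinearOrder.toDecidableLT (List Int) _)]
  have hmapeq : (fun v => [v, ((both.filter (fun item => pvKey item == v)).map (fun item => pvWt item)).sum])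
      = (fun (p : Int × Int) => [p.1, p.2]) ∘ (fun k => (k, pvTotal both k)) := by
    funext v; rfl
  rw [hmapeq, ← List.map_map, ← List.map_map]
  have hperm : ((PySem.List.sorted (PySem.Set.ofList (both.map (fun item => pvKey item))) (fun v => v) false).map
      (fun k => (k, pvTotal both k))).Perm ((PySem.Set.ofList (both.map pvKey)).map (fun k => (k, pvTotal both k))) :=
    (PySem.List.sorted_perm _ _ _).map _
  have hpair : ((PySem.List.sorted (PySem.Set.ofList (both.map (fun item => pvKey item))) (fun v => v) false).map
      (fun k => (k, pvTotal both k))).Pairwise (fun a b => a.1 < b.1) :=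
    List.Pairwise.map _ (fun _ _ hab => hab)
      (PySem.List.sorted_ofList_pairwise_lt (xs := both.map (fun item => pvKey item)))
  exact PySem.List.sorted_eq_of_perm_of_pairwise_lt _ _ (fun x => x) (hperm.map _)
    (List.Pairwise.map _ (fun _ _ hab => List.Lex.rel hab) hpair)
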